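-- pv_equiv track=rewrite | github.com/Davidbestion/proyecto_IA | utils.py | dfs
-- ===== SOURCE A (Python) =====
-- adj = [
--             (0, -1),   # Izquierda
--             (0, 1),    # Derecha
--             (-1, 0),   # Arriba
--             (1, 0),    # Abajo
--             (-1, 1),   # Arriba derecha
--             (1, -1)    # Abajo izquierda
--         ]
--
-- def dfs(g,player_id,size):
--     visited = set()
--     p = {}
--     for u in g:
--         if u[2 - player_id] != 0:  # player1 usa columna (izq->der), player2 usa fila (arr->abajo)
--             continue
--         if u not in visited:
--             p[(u[0],u[1])] = None
--             if dfs_visit(g,u,visited,p,size,player_id):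
--                 return True
--     return False
--
-- def dfs_visit(g,u,visited,p,size,player_id):
--     visited.add((u))
--     for dir in adj:
--         v = (u[0]+dir[0],u[1]+dir[1])
--         if v not in g:
--             continue
--         if v[2 - player_id] == size - 1:  # player1: col N-1; player2: fila N-1
--             p[v] = u
--             return True
--         if v not in visited:
--             p[v] = u
--             if dfs_visit(g,v,visited,p,size,player_id):
--                 return True
--     return False
-- ===== SOURCE B (Python) =====
-- adj = [
--     (0, -1),
--     (0, 1),
--     (-1, 0),
--     (1, 0),
--     (-1, 1),
--     (1, -1)
-- ]
--
-- def dfs(g, player_id, size):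
--     c = 2 - player_id
--     nodes = set(g)
--     reached = {u for u in nodes if u[c] == 0}
--     frontier = reached
--     while frontier:
--         nxt = {(u[0] + d[0], u[1] + d[1]) for u in frontier for d in adj}
--         frontier = (nxt & nodes) - reached
--         reached = reached | frontier
--     return any(
--         (u[0] + d[0], u[1] + d[1]) in nodes
--         and (u[0] + d[0], u[1] + d[1])[c] == size - 1
--         for u in reached for d in adj
--     )
-- ===== Notes on version B (the rewrite author's own statement) =====
-- stated objective: alternative
-- what changed: Replaces the recursive per-start DFS with visited/parent bookkeeping by a global frontier-expansion (BFS-style) closure of all start nodes using set operations, followed by a single scan for a goal neighbour; the dead parent dict is gone.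
import Mathlib
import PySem

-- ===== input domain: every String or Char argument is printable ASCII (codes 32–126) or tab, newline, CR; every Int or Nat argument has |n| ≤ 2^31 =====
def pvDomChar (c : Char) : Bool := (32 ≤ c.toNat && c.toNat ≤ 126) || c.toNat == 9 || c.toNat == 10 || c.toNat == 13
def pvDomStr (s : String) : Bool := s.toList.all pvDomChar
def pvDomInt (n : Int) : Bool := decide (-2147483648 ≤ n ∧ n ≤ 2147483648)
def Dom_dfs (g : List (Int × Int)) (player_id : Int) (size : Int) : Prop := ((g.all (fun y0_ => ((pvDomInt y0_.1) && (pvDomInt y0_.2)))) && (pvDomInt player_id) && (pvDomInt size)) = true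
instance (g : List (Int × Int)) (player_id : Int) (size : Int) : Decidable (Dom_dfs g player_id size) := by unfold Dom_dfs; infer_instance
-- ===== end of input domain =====

-- B replaces the per-start recursive DFS (with its visited set and dead parent dict) by a global
-- frontier-expansion closure of all start nodes followed by one scan for a goal neighbour (objective: alternative).

-- ===== PORT A =====
-- the module-level 'adj' constant (shared by A and B, as in the Python module)
def adjA : List (Int × Int) := [(0, -1), (0, 1), (-1, 0), (1, 0), (-1, 1), (1, -1)]

-- u[2 - player_id] : Python tuple indexing (incl. negative indices); exact for player_id ∈ {1,2,3,4},
-- i.e. on Pre_dfs (outside it Python raises IndexError)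
def pyCoord (u : Int × Int) (player_id : Int) : Int :=
  if player_id = 2 ∨ player_id = 4 then u.1 else u.2

-- dfs_visit, threaded state (visited, p, result). The fuel argument only makes the recursion
-- structural; dfs calls it with fuel g.length + 1, which is proved sufficient below (fuel_never_out).
mutual
def dfsVisit (g : List (Int × Int)) (player_id size : Int) :
    Nat → Int × Int → PySem.Set (Int × Int) → PySem.Dict (Int × Int) (Option (Int × Int)) →
    PySem.Set (Int × Int) × PySem.Dict (Int × Int) (Option (Int × Int)) × Bool
  | 0, _, visited, p => (visited, p, false)
  | fuel + 1, u, visited, p =>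
      visitDirs g player_id size fuel u adjA (PySem.Set.add visited u) p
termination_by fuel _ _ _ => (fuel, 0)

def visitDirs (g : List (Int × Int)) (player_id size : Int) :
    Nat → Int × Int → List (Int × Int) → PySem.Set (Int × Int) →
    PySem.Dict (Int × Int) (Option (Int × Int)) →
    PySem.Set (Int × Int) × PySem.Dict (Int × Int) (Option (Int × Int)) × Bool
  | _, _, [], visited, p => (visited, p, false)
  | fuel, u, d :: ds, visited, p =>
      let v := (u.1 + d.1, u.2 + d.2)
      if v ∈ g then
        if pyCoord v player_id = size - 1 then
          (visited, PySem.Dict.insert p v (some u), true)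
        else if PySem.Set.contains visited v then
          visitDirs g player_id size fuel u ds visited p
        else
          let r := dfsVisit g player_id size fuel v visited (PySem.Dict.insert p v (some u))
          if r.2.2 then r else visitDirs g player_id size fuel u ds r.1 r.2.1
      else visitDirs g player_id size fuel u ds visited p
termination_by fuel _ ds _ _ => (fuel, ds.length + 1)
end

def dfsLoop (g : List (Int × Int)) (player_id size : Int) :
    List (Int × Int) → PySem.Set (Int × Int) → PySem.Dict (Int × Int) (Option (Int × Int)) → Bool
  | [], _, _ => false
  | u :: us, visited, p =>
      if pyCoord u player_id ≠ 0 then dfsLoop g player_id size us visited p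
      else if PySem.Set.contains visited u then dfsLoop g player_id size us visited p
      else
        let r := dfsVisit g player_id size (g.length + 1) u visited
                  (PySem.Dict.insert p (u.1, u.2) none)
        if r.2.2 then true else dfsLoop g player_id size us r.1 r.2.1

def dfs (g : List (Int × Int)) (player_id : Int) (size : Int) : Bool :=
  dfsLoop g player_id size g PySem.Set.empty PySem.Dict.empty

-- ===== PORT B =====
-- {(u[0]+d[0], u[1]+d[1]) for u in frontier for d in adj}
def altExpand (frontier : PySem.Set (Int × Int)) : PySem.Set (Int × Int) :=
  PySem.Set.ofList (frontier.flatMap (fun u => adjA.map (fun d => (u.1 + d.1, u.2 + d.2))))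

-- the while-loop; fuel g.length + 1 is proved sufficient below
def altLoop (nodes : PySem.Set (Int × Int)) :
    Nat → PySem.Set (Int × Int) → PySem.Set (Int × Int) → PySem.Set (Int × Int)
  | 0, reached, _ => reached
  | fuel + 1, reached, frontier =>
      if frontier.isEmpty then reached
      else
        let frontier' := PySem.Set.diff (PySem.Set.inter (altExpand frontier) nodes) reached
        altLoop nodes fuel (PySem.Set.union reached frontier') frontier'

def dfs_alt (g : List (Int × Int)) (player_id : Int) (size : Int) : Bool :=
  let nodes := PySem.Set.ofList g
  let starts : PySem.Set (Int × Int) := nodes.filter (fun u => pyCoord u player_id == 0)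
  let reached := altLoop nodes (g.length + 1) starts starts
  reached.any (fun u => adjA.any (fun d =>
    PySem.Set.contains nodes (u.1 + d.1, u.2 + d.2) &&
      (pyCoord (u.1 + d.1, u.2 + d.2) player_id == size - 1)))

-- ===== PRECONDITION & SPEC =====
-- Pre_dfs excludes exactly the inputs on which Python A raises IndexError: a nonempty g with
-- player_id outside {1,2,3,4} (u[2-player_id] is then an out-of-range tuple index).
def Pre_dfs (g : List (Int × Int)) (player_id : Int) (size : Int) : Prop :=
  g = [] ∨ (1 ≤ player_id ∧ player_id ≤ 4)
instance (g : List (Int × Int)) (player_id : Int) (size : Int) : Decidable (Pre_dfs g player_id size) := by unfold Pre_dfs; infer_instance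

def pvWitness_dfs : (List (Int × Int)) × Int × Int := ([(0, 0), (0, 1)], 1, 2)

def Spec_dfs (g : List (Int × Int)) (player_id : Int) (size : Int) (out : Bool) : Prop := out = dfs_alt g player_id size
instance (g : List (Int × Int)) (player_id : Int) (size : Int) (out : Bool) : Decidable (Spec_dfs g player_id size out) := by unfold Spec_dfs; infer_instance

-- ===== CLAIM (what is proved, stated in full; the proofs are below) =====
def Claim_equal_dfs : Prop := ∀ (g : List (Int × Int)) (player_id : Int) (size : Int), Dom_dfs g player_id size → Pre_dfs g player_id size → Spec_dfs g player_id size (dfs g player_id size)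

-- ===== LEMMAS AND PROOFS =====

-- the neighbour of x in direction d
def nb (x d : Int × Int) : Int × Int := (x.1 + d.1, x.2 + d.2)

-- the edge relation both searches walk: a step from u, in one of the six directions, landing in g
def edgeR (g : List (Int × Int)) (u v : Int × Int) : Prop :=
  v ∈ g ∧ ∃ d ∈ adjA, v = nb u d

-- v is reachable from some start node (a node of g whose relevant coordinate is 0)
def reachP (g : List (Int × Int)) (player_id : Int) (v : Int × Int) : Prop :=
  ∃ s, s ∈ g ∧ pyCoord s player_id = 0 ∧ Relation.ReflTransGen (edgeR g) s v

-- x has a goal neighbour: some direction lands in g on the target coordinate size-1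
def goalAdjB (g : List (Int × Int)) (player_id size : Int) (x : Int × Int) : Bool :=
  adjA.any (fun d => decide (nb x d ∈ g) && decide (pyCoord (nb x d) player_id = size - 1))

-- the common mathematical value of both programs
def GProp (g : List (Int × Int)) (player_id size : Int) : Prop :=
  ∃ v, reachP g player_id v ∧ goalAdjB g player_id size v = true

-- x has been fully expanded relative to the set V: every neighbour in g is a non-goal and lies in V
def expandedIn (g : List (Int × Int)) (player_id size : Int) (V : List (Int × Int)) (x : Int × Int) : Prop :=
  ∀ d ∈ adjA, nb x d ∈ g → pyCoord (nb x d) player_id ≠ size - 1 ∧ nb x d ∈ V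

-- number of distinct nodes of g not yet in V (the fuel measure)
def mNew (g : List (Int × Int)) (V : PySem.Set (Int × Int)) : Nat :=
  (PySem.Set.ofList g).countP (fun x => !(PySem.Set.contains V x))

theorem expandedIn_mono {g : List (Int × Int)} {player_id size : Int} {V V' : List (Int × Int)}
    (h : ∀ x ∈ V, x ∈ V') {x : Int × Int} (hx : expandedIn g player_id size V x) :
    expandedIn g player_id size V' x := by
  intro d hd hmem
  exact ⟨(hx d hd hmem).1, h _ (hx d hd hmem).2⟩

theorem countP_lt_of {α : Type} (l : List α) (p q : α → Bool)
    (h : ∀ x ∈ l, q x = true → p x = true) (u : α) (hu : u ∈ l)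
    (hq : q u = false) (hp : p u = true) : l.countP q < l.countP p := by
  induction l with
  | nil => cases hu
  | cons a t ih =>
    rcases List.mem_cons.mp hu with rfl | hu'
    · have hle : t.countP q ≤ t.countP p :=
        List.countP_mono_left (fun x hx => h x (List.mem_cons_of_mem _ hx))
      simp [hq, hp]
      omega
    · have hlt := ih (fun x hx => h x (List.mem_cons_of_mem _ hx)) hu'
      by_cases hqa : q a = true
      · have hpa := h a (List.mem_cons_self) hqa
        simp [hqa, hpa]; omega
      · simp only [List.countP_cons]
        split_ifs <;> omega

theorem mNew_le (g : List (Int × Int)) (V : PySem.Set (Int × Int)) :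
    mNew g V ≤ g.length := by
  exact le_trans List.countP_le_length (PySem.Set.length_ofList_le g)

theorem mNew_anti (g : List (Int × Int)) {V V' : PySem.Set (Int × Int)}
    (h : ∀ x ∈ V, x ∈ V') : mNew g V' ≤ mNew g V := by
  apply List.countP_mono_left
  intro x _ hx
  simp only [Bool.not_eq_eq_eq_not, Bool.not_true, ← Bool.not_eq_true] at hx ⊢
  intro hc
  exact hx ((PySem.Set.contains_iff _ _).mpr (h x ((PySem.Set.contains_iff _ _).mp hc)))

theorem mNew_add_lt (g : List (Int × Int)) (V : PySem.Set (Int × Int)) {u : Int × Int}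
    (hu : u ∈ g) (hnv : u ∉ V) : mNew g (PySem.Set.add V u) < mNew g V := by
  have hfun : ∀ x ∈ PySem.Set.ofList g,
      (!(PySem.Set.contains (PySem.Set.add V u) x)) = true →
      (!(PySem.Set.contains V x)) = true := by
    intro x _ hx
    simp only [Bool.not_eq_eq_eq_not, Bool.not_true, ← Bool.not_eq_true] at hx ⊢
    intro hc
    exact hx ((PySem.Set.contains_iff _ _).mpr
      ((PySem.Set.mem_add V u x).mpr (Or.inl ((PySem.Set.contains_iff _ _).mp hc))))
  have hq : (!(PySem.Set.contains (PySem.Set.add V u) u)) = false := by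
    simp
  have hp : (!(PySem.Set.contains V u)) = true := by
    simp only [Bool.not_eq_eq_eq_not, Bool.not_true, ← Bool.not_eq_true]
    intro hc
    exact hnv ((PySem.Set.contains_iff _ _).mp hc)
  exact countP_lt_of _ _ _ hfun u ((PySem.Set.mem_ofList g u).mpr hu) hq hp

theorem mNew_pos (g : List (Int × Int)) (V : PySem.Set (Int × Int)) {u : Int × Int}
    (hu : u ∈ g) (hnv : u ∉ V) : 1 ≤ mNew g V := by
  have : u ∈ PySem.Set.ofList g := (PySem.Set.mem_ofList g u).mpr hu
  have hcp : (fun x => !(PySem.Set.contains V x)) u = true := by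
    simp only [← Bool.not_eq_true, Bool.not_eq_eq_eq_not, Bool.not_true]
    intro hc
    exact hnv ((PySem.Set.contains_iff _ _).mp hc)
  have hpos : 0 < (PySem.Set.ofList g).countP (fun x => !(PySem.Set.contains V x)) :=
    List.countP_pos_iff.mpr ⟨u, this, hcp⟩
  unfold mNew
  omega

-- ---- soundness: a true result exhibits a reachable node with a goal neighbour ----
theorem dirs_sound_of (g : List (Int × Int)) (player_id size : Int) (fuel : Nat)
    (hv : ∀ u V p, (dfsVisit g player_id size fuel u V p).2.2 = true →
      ∃ w, Relation.ReflTransGen (edgeR g) u w ∧ goalAdjB g player_id size w = true) :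
    ∀ ds u V p, (∀ d ∈ ds, d ∈ adjA) →
      (visitDirs g player_id size fuel u ds V p).2.2 = true →
      ∃ w, Relation.ReflTransGen (edgeR g) u w ∧ goalAdjB g player_id size w = true := by
  intro ds
  induction ds with
  | nil => intro u V p _ h; simp [visitDirs] at h
  | cons d ds ih =>
    intro u V p hds h
    have hdadj : d ∈ adjA := hds d (List.mem_cons_self)
    have hds' : ∀ d' ∈ ds, d' ∈ adjA := fun d' hd' => hds d' (List.mem_cons_of_mem _ hd')
    simp only [visitDirs] at h
    by_cases h1 : (u.1 + d.1, u.2 + d.2) ∈ g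
    · simp only [h1, if_true] at h
      by_cases h2 : pyCoord (u.1 + d.1, u.2 + d.2) player_id = size - 1
      · refine ⟨u, Relation.ReflTransGen.refl, ?_⟩
        exact List.any_eq_true.mpr ⟨d, hdadj, by simp [nb, h1, h2]⟩
      · simp only [h2, if_false] at h
        by_cases h3 : PySem.Set.contains V (u.1 + d.1, u.2 + d.2) = true
        · simp only [h3, if_true] at h
          exact ih u V p hds' h
        · simp only [h3] at h
          by_cases h4 : (dfsVisit g player_id size fuel (u.1 + d.1, u.2 + d.2) V
              (PySem.Dict.insert p (u.1 + d.1, u.2 + d.2) (some u))).2.2 = true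
          · obtain ⟨w, hpath, hgoal⟩ := hv _ _ _ h4
            refine ⟨w, Relation.ReflTransGen.head ⟨h1, d, hdadj, rfl⟩ hpath, hgoal⟩
          · simp only [h4] at h
            exact ih _ _ _ hds' h
    · simp only [h1, if_false] at h
      exact ih u V p hds' h

theorem visit_sound (g : List (Int × Int)) (player_id size : Int) :
    ∀ fuel u V p, (dfsVisit g player_id size fuel u V p).2.2 = true →
      ∃ w, Relation.ReflTransGen (edgeR g) u w ∧ goalAdjB g player_id size w = true := by
  intro fuel
  induction fuel with
  | zero => intro u V p h; simp [dfsVisit] at h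
  | succ fuel ih =>
    intro u V p h
    simp only [dfsVisit] at h
    exact dirs_sound_of g player_id size fuel ih adjA u _ p (fun _ hd => hd) h

-- ---- the false-result invariant (with fuel sufficiency) ----
theorem dirs_false_of (g : List (Int × Int)) (player_id size : Int) (fuel : Nat)
    (hv : ∀ u V p, u ∈ g → u ∉ V → mNew g V ≤ fuel →
      (dfsVisit g player_id size fuel u V p).2.2 = false →
      (∀ x ∈ V, x ∈ (dfsVisit g player_id size fuel u V p).1) ∧
      u ∈ (dfsVisit g player_id size fuel u V p).1 ∧
      (∀ x ∈ (dfsVisit g player_id size fuel u V p).1,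
          x ∈ V ∨ expandedIn g player_id size (dfsVisit g player_id size fuel u V p).1 x)) :
    ∀ ds u V p, mNew g V ≤ fuel →
      (visitDirs g player_id size fuel u ds V p).2.2 = false →
      (∀ x ∈ V, x ∈ (visitDirs g player_id size fuel u ds V p).1) ∧
      (∀ x ∈ (visitDirs g player_id size fuel u ds V p).1,
          x ∈ V ∨ expandedIn g player_id size (visitDirs g player_id size fuel u ds V p).1 x) ∧
      (∀ d ∈ ds, (u.1 + d.1, u.2 + d.2) ∈ g →
          pyCoord (u.1 + d.1, u.2 + d.2) player_id ≠ size - 1 ∧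
          (u.1 + d.1, u.2 + d.2) ∈ (visitDirs g player_id size fuel u ds V p).1) := by
  intro ds
  induction ds with
  | nil =>
    intro u V p _ _
    refine ⟨fun x hx => by simpa [visitDirs] using hx,
            fun x hx => Or.inl (by simpa [visitDirs] using hx),
            by simp⟩
  | cons d ds ih =>
    intro u V p hfuel h
    by_cases h1 : (u.1 + d.1, u.2 + d.2) ∈ g
    · by_cases h2 : pyCoord (u.1 + d.1, u.2 + d.2) player_id = size - 1
      · exfalso; simp [visitDirs, h1, h2] at h
      · by_cases h3 : PySem.Set.contains V (u.1 + d.1, u.2 + d.2) = true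
        · simp only [visitDirs, h1, if_true, h2, if_false, h3] at h ⊢
          obtain ⟨c1, c2, c3⟩ := ih u V p hfuel h
          refine ⟨c1, c2, ?_⟩
          intro d' hd' hg'
          rcases List.mem_cons.mp hd' with rfl | hd''
          · exact ⟨h2, c1 _ ((PySem.Set.contains_iff _ _).mp h3)⟩
          · exact c3 d' hd'' hg'
        · have hnv : (u.1 + d.1, u.2 + d.2) ∉ V := fun hmem =>
            h3 ((PySem.Set.contains_iff _ _).mpr hmem)
          by_cases h4 : (dfsVisit g player_id size fuel (u.1 + d.1, u.2 + d.2) V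
              (PySem.Dict.insert p (u.1 + d.1, u.2 + d.2) (some u))).2.2 = true
          · exfalso; simp [visitDirs, h1, h2, hnv, h4] at h
          · have h4' : (dfsVisit g player_id size fuel (u.1 + d.1, u.2 + d.2) V
                (PySem.Dict.insert p (u.1 + d.1, u.2 + d.2) (some u))).2.2 = false :=
              Bool.not_eq_true _ ▸ (by simpa using h4)
            obtain ⟨pv1, pv2, pv3⟩ := hv _ _ _ h1 hnv hfuel h4'
            simp only [visitDirs, h1, if_true, h2, if_false, h3, h4, if_false] at h ⊢
            have hfuel' : mNew g (dfsVisit g player_id size fuel (u.1 + d.1, u.2 + d.2) V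
                (PySem.Dict.insert p (u.1 + d.1, u.2 + d.2) (some u))).1 ≤ fuel :=
              le_trans (mNew_anti g pv1) hfuel
            obtain ⟨c1, c2, c3⟩ := ih u _ _ hfuel' h
            refine ⟨fun x hx => c1 x (pv1 x hx), ?_, ?_⟩
            · intro x hx
              rcases c2 x hx with hx' | hx'
              · rcases pv3 x hx' with hx'' | hx''
                · exact Or.inl hx''
                · exact Or.inr (expandedIn_mono c1 hx'')
              · exact Or.inr hx'
            · intro d' hd' hg'
              rcases List.mem_cons.mp hd' with rfl | hd''
              · exact ⟨h2, c1 _ pv2⟩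
              · exact c3 d' hd'' hg'
    · simp only [visitDirs, h1, if_false] at h ⊢
      obtain ⟨c1, c2, c3⟩ := ih u V p hfuel h
      refine ⟨c1, c2, ?_⟩
      intro d' hd' hg'
      rcases List.mem_cons.mp hd' with rfl | hd''
      · exact absurd hg' h1
      · exact c3 d' hd'' hg'

theorem visit_false (g : List (Int × Int)) (player_id size : Int) :
    ∀ fuel u V p, u ∈ g → u ∉ V → mNew g V ≤ fuel →
      (dfsVisit g player_id size fuel u V p).2.2 = false →
      (∀ x ∈ V, x ∈ (dfsVisit g player_id size fuel u V p).1) ∧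
      u ∈ (dfsVisit g player_id size fuel u V p).1 ∧
      (∀ x ∈ (dfsVisit g player_id size fuel u V p).1,
          x ∈ V ∨ expandedIn g player_id size (dfsVisit g player_id size fuel u V p).1 x) := by
  intro fuel
  induction fuel with
  | zero =>
    intro u V p hu hnv hfuel _
    exact absurd hfuel (by have := mNew_pos g V hu hnv; omega)
  | succ fuel ih =>
    intro u V p hu hnv hfuel h
    have hfuel' : mNew g (PySem.Set.add V u) ≤ fuel := by
      have := mNew_add_lt g V hu hnv; omega
    simp only [dfsVisit] at h ⊢
    obtain ⟨c1, c2, c3⟩ := dirs_false_of g player_id size fuel ih adjA u _ p hfuel' h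
    refine ⟨fun x hx => c1 x ((PySem.Set.mem_add V u x).mpr (Or.inl hx)),
            c1 u ((PySem.Set.mem_add V u u).mpr (Or.inr rfl)), ?_⟩
    intro x hx
    rcases c2 x hx with hx' | hx'
    · rcases (PySem.Set.mem_add V u x).mp hx' with hx'' | rfl
      · exact Or.inl hx''
      · exact Or.inr (fun d hd hg => c3 d hd hg)
    · exact Or.inr hx'

-- ---- top loop ----
theorem loop_sound (g : List (Int × Int)) (player_id size : Int) :
    ∀ us V p, (∀ u ∈ us, u ∈ g) → dfsLoop g player_id size us V p = true →
      GProp g player_id size := by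
  intro us
  induction us with
  | nil => intro V p _ h; simp [dfsLoop] at h
  | cons u us ih =>
    intro V p hus h
    have hus' : ∀ x ∈ us, x ∈ g := fun x hx => hus x (List.mem_cons_of_mem _ hx)
    by_cases hc : pyCoord u player_id = 0
    · by_cases hvis : PySem.Set.contains V u = true
      · simp only [dfsLoop] at h
        rw [if_neg (not_not_intro hc), if_pos hvis] at h
        exact ih _ _ hus' h
      · by_cases hr : (dfsVisit g player_id size (g.length + 1) u V
            (PySem.Dict.insert p (u.1, u.2) none)).2.2 = true
        · obtain ⟨w, hpath, hgoal⟩ := visit_sound g player_id size _ _ _ _ hr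
          exact ⟨w, ⟨u, hus u List.mem_cons_self, hc, hpath⟩, hgoal⟩
        · simp only [dfsLoop] at h
          rw [if_neg (not_not_intro hc), if_neg hvis, if_neg hr] at h
          exact ih _ _ hus' h
    · simp only [dfsLoop] at h
      rw [if_pos hc] at h
      exact ih _ _ hus' h

theorem loop_false (g : List (Int × Int)) (player_id size : Int) :
    ∀ us V p, (∀ u ∈ us, u ∈ g) → (∀ x ∈ V, expandedIn g player_id size V x) →
      dfsLoop g player_id size us V p = false →
      ∃ Vf : List (Int × Int),
        (∀ x ∈ V, x ∈ Vf) ∧ (∀ x ∈ Vf, expandedIn g player_id size Vf x) ∧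
        (∀ u ∈ us, pyCoord u player_id = 0 → u ∈ Vf) := by
  intro us
  induction us with
  | nil =>
    intro V p _ hinv _
    exact ⟨V, fun x hx => hx, hinv, by simp⟩
  | cons u us ih =>
    intro V p hus hinv h
    have hus' : ∀ x ∈ us, x ∈ g := fun x hx => hus x (List.mem_cons_of_mem _ hx)
    by_cases hc : pyCoord u player_id = 0
    · by_cases hvis : PySem.Set.contains V u = true
      · simp only [dfsLoop] at h
        rw [if_neg (not_not_intro hc), if_pos hvis] at h
        obtain ⟨Vf, c1, c2, c3⟩ := ih _ _ hus' hinv h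
        refine ⟨Vf, c1, c2, ?_⟩
        intro x hx _
        rcases List.mem_cons.mp hx with rfl | hx'
        · exact c1 x ((PySem.Set.contains_iff _ _).mp hvis)
        · exact c3 x hx' ‹_›
      · have hnv : u ∉ V := fun hm => hvis ((PySem.Set.contains_iff _ _).mpr hm)
        by_cases hr : (dfsVisit g player_id size (g.length + 1) u V
            (PySem.Dict.insert p (u.1, u.2) none)).2.2 = true
        · exfalso
          simp only [dfsLoop] at h
          rw [if_neg (not_not_intro hc), if_neg hvis, if_pos hr] at h
          exact Bool.true_eq_false ▸ h
        · have hr' : (dfsVisit g player_id size (g.length + 1) u V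
              (PySem.Dict.insert p (u.1, u.2) none)).2.2 = false := by simpa using hr
          have hfuel : mNew g V ≤ g.length + 1 := by
            have := mNew_le g V; omega
          obtain ⟨pv1, pv2, pv3⟩ := visit_false g player_id size _ _ _ _
            (hus u List.mem_cons_self) hnv hfuel hr'
          have hinv' : ∀ x ∈ (dfsVisit g player_id size (g.length + 1) u V
              (PySem.Dict.insert p (u.1, u.2) none)).1,
              expandedIn g player_id size (dfsVisit g player_id size (g.length + 1) u V
                (PySem.Dict.insert p (u.1, u.2) none)).1 x := by
            intro x hx
            rcases pv3 x hx with hx' | hx'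
            · exact expandedIn_mono pv1 (hinv x hx')
            · exact hx'
          simp only [dfsLoop] at h
          rw [if_neg (not_not_intro hc), if_neg hvis, if_neg hr] at h
          obtain ⟨Vf, c1, c2, c3⟩ := ih _ _ hus' hinv' h
          refine ⟨Vf, fun x hx => c1 x (pv1 x hx), c2, ?_⟩
          intro x hx _
          rcases List.mem_cons.mp hx with rfl | hx'
          · exact c1 x pv2
          · exact c3 x hx' ‹_›
    · simp only [dfsLoop] at h
      rw [if_pos hc] at h
      obtain ⟨Vf, c1, c2, c3⟩ := ih _ _ hus' hinv h
      refine ⟨Vf, c1, c2, ?_⟩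
      intro x hx hx0
      rcases List.mem_cons.mp hx with rfl | hx'
      · exact absurd hx0 hc
      · exact c3 x hx' hx0

theorem dfs_eq_true_iff (g : List (Int × Int)) (player_id size : Int) :
    dfs g player_id size = true ↔ GProp g player_id size := by
  constructor
  · intro h
    exact loop_sound g player_id size g _ _ (fun _ hu => hu) h
  · intro hG
    by_contra hne
    have hfalse : dfsLoop g player_id size g PySem.Set.empty PySem.Dict.empty = false := by
      simpa [dfs] using hne
    obtain ⟨Vf, _, c2, c3⟩ := loop_false g player_id size g _ _ (fun _ hu => hu)
      (by intro x hx; cases hx) hfalse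
    obtain ⟨v, ⟨s, hsg, hs0, hpath⟩, hgoal⟩ := hG
    have hsVf : s ∈ Vf := c3 s hsg hs0
    have hvVf : v ∈ Vf := by
      clear hgoal
      induction hpath with
      | refl => exact hsVf
      | tail _ hedge ihp =>
        obtain ⟨hin, d, hd, rfl⟩ := hedge
        exact (c2 _ ihp d hd hin).2
    obtain ⟨d, hd, hdec⟩ := List.any_eq_true.mp hgoal
    rw [Bool.and_eq_true, decide_eq_true_eq, decide_eq_true_eq] at hdec
    exact absurd hdec.2 (c2 v hvVf d hd hdec.1).1

-- ---- B side ----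
theorem closed_char (g : List (Int × Int)) (player_id : Int) (reached : List (Int × Int))
    (hstart : ∀ s, s ∈ g → pyCoord s player_id = 0 → s ∈ reached)
    (hsound : ∀ x ∈ reached, reachP g player_id x)
    (hclosed : ∀ x ∈ reached, ∀ d ∈ adjA, nb x d ∈ g → nb x d ∈ reached) :
    ∀ x, x ∈ reached ↔ reachP g player_id x := by
  intro x
  constructor
  · exact hsound x
  · rintro ⟨s, hsg, hs0, hpath⟩
    induction hpath with
    | refl => exact hstart s hsg hs0
    | tail _ hedge ihp =>
      obtain ⟨hin, d, hd, rfl⟩ := hedge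
      exact hclosed _ ihp d hd hin

theorem altLoop_nil (nodes : PySem.Set (Int × Int)) :
    ∀ fuel reached, altLoop nodes fuel reached ([] : PySem.Set (Int × Int)) = reached := by
  intro fuel reached
  cases fuel with
  | zero => rfl
  | succ fuel => simp [altLoop]

theorem altLoop_char (g : List (Int × Int)) (player_id : Int) :
    ∀ fuel (reached frontier : PySem.Set (Int × Int)),
      (∀ x ∈ frontier, x ∈ reached) →
      (∀ x ∈ reached, x ∈ g) →
      (∀ s, s ∈ g → pyCoord s player_id = 0 → s ∈ reached) →
      (∀ x ∈ reached, reachP g player_id x) →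
      (∀ x ∈ reached, x ∉ frontier → ∀ d ∈ adjA, nb x d ∈ g → nb x d ∈ reached) →
      mNew g reached < fuel →
      ∀ x, x ∈ altLoop (PySem.Set.ofList g) fuel reached frontier ↔ reachP g player_id x := by
  intro fuel
  induction fuel with
  | zero => intro reached frontier _ _ _ _ _ hfuel; omega
  | succ fuel ih =>
    intro reached frontier h1 h2 h3 h4 h5 hfuel
    by_cases hf : frontier.isEmpty = true
    · have hfe : frontier = [] := List.isEmpty_iff.mp hf
      simp only [altLoop]
      rw [if_pos hf]
      exact closed_char g player_id reached h3 h4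
        (fun x hx d hd hg => h5 x hx (by simp [hfe]) d hd hg)
    · have hmemF' : ∀ x, x ∈ PySem.Set.diff
          (PySem.Set.inter (altExpand frontier) (PySem.Set.ofList g)) reached ↔
          ((∃ u ∈ frontier, ∃ d ∈ adjA, x = nb u d) ∧ x ∈ g ∧ x ∉ reached) := by
        intro x
        rw [PySem.Set.mem_diff, PySem.Set.mem_inter, PySem.Set.mem_ofList]
        unfold altExpand
        rw [PySem.Set.mem_ofList, List.mem_flatMap]
        constructor
        · rintro ⟨⟨⟨u, hu, hx⟩, hg⟩, hnr⟩
          obtain ⟨d, hd, rfl⟩ := List.mem_map.mp hx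
          exact ⟨⟨u, hu, d, hd, rfl⟩, hg, hnr⟩
        · rintro ⟨⟨u, hu, d, hd, rfl⟩, hg, hnr⟩
          exact ⟨⟨⟨u, hu, List.mem_map.mpr ⟨d, hd, rfl⟩⟩, hg⟩, hnr⟩
      set F' := PySem.Set.diff
          (PySem.Set.inter (altExpand frontier) (PySem.Set.ofList g)) reached with hF'def
      have hcl' : ∀ x ∈ reached, ∀ d ∈ adjA, nb x d ∈ g →
          nb x d ∈ PySem.Set.union reached F' := by
        intro x hx d hd hg
        by_cases hxf : x ∈ frontier
        · by_cases hnr : nb x d ∈ reached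
          · exact (PySem.Set.mem_union _ _ _).mpr (Or.inl hnr)
          · exact (PySem.Set.mem_union _ _ _).mpr (Or.inr ((hmemF' _).mpr
              ⟨⟨x, hxf, d, hd, rfl⟩, hg, hnr⟩))
        · exact (PySem.Set.mem_union _ _ _).mpr (Or.inl (h5 x hx hxf d hd hg))
      have hsound' : ∀ x ∈ PySem.Set.union reached F', reachP g player_id x := by
        intro x hx
        rcases (PySem.Set.mem_union _ _ _).mp hx with hx' | hx'
        · exact h4 x hx'
        · obtain ⟨⟨u, hu, d, hd, rfl⟩, hg, _⟩ := (hmemF' _).mp hx'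
          obtain ⟨s, hsg, hs0, hpath⟩ := h4 u (h1 u hu)
          exact ⟨s, hsg, hs0, hpath.tail ⟨hg, d, hd, rfl⟩⟩
      simp only [altLoop]
      rw [if_neg hf]
      rw [show (((altExpand frontier).inter (PySem.Set.ofList g)).diff reached) = F' from rfl]
      by_cases hFe : F' = []
      · rw [hFe]
        have : PySem.Set.union reached ([] : List (Int × Int)) = reached := rfl
        rw [this]
        rw [altLoop_nil]
        refine closed_char g player_id reached h3 h4 ?_
        intro x hx d hd hg
        have := hcl' x hx d hd hg
        rw [hFe] at this
        rcases (PySem.Set.mem_union _ _ _).mp this with h' | h'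
        · exact h'
        · cases h'
      · obtain ⟨y, hy⟩ := List.exists_mem_of_ne_nil F' hFe
        obtain ⟨_, hyg, hynr⟩ := (hmemF' _).mp hy
        have hmono : ∀ x ∈ reached, x ∈ PySem.Set.union reached F' :=
          fun x hx => (PySem.Set.mem_union _ _ _).mpr (Or.inl hx)
        have hlt : mNew g (PySem.Set.union reached F') < mNew g reached := by
          apply countP_lt_of _ _ _ ?_ y ((PySem.Set.mem_ofList g y).mpr hyg)
          · simp [(PySem.Set.mem_union reached F' y).mpr (Or.inr hy)]
          · simp only [Bool.not_eq_eq_eq_not, Bool.not_true, ← Bool.not_eq_true]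
            intro hc
            exact hynr ((PySem.Set.contains_iff _ _).mp hc)
          · intro x _ hx
            simp only [Bool.not_eq_eq_eq_not, Bool.not_true, ← Bool.not_eq_true] at hx ⊢
            intro hc
            exact hx ((PySem.Set.contains_iff _ _).mpr (hmono x ((PySem.Set.contains_iff _ _).mp hc)))
        apply ih (PySem.Set.union reached F') F'
        · intro x hx; exact (PySem.Set.mem_union _ _ _).mpr (Or.inr hx)
        · intro x hx
          rcases (PySem.Set.mem_union _ _ _).mp hx with hx' | hx'
          · exact h2 x hx'
          · exact ((hmemF' _).mp hx').2.1
        · intro s hsg hs0; exact hmono s (h3 s hsg hs0)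
        · exact hsound'
        · intro x hx hxF d hd hg
          rcases (PySem.Set.mem_union _ _ _).mp hx with hx' | hx'
          · exact hcl' x hx' d hd hg
          · exact absurd hx' hxF
        · omega

theorem dfs_alt_eq_true_iff (g : List (Int × Int)) (player_id size : Int) :
    dfs_alt g player_id size = true ↔ GProp g player_id size := by
  have hs : ∀ x, x ∈ (PySem.Set.ofList g).filter (fun u => pyCoord u player_id == 0) ↔
      (x ∈ g ∧ pyCoord x player_id = 0) := by
    intro x
    rw [List.mem_filter, PySem.Set.mem_ofList]
    simp
  have hchar := altLoop_char g player_id (g.length + 1)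
      ((PySem.Set.ofList g).filter (fun u => pyCoord u player_id == 0))
      ((PySem.Set.ofList g).filter (fun u => pyCoord u player_id == 0))
      (fun x hx => hx)
      (fun x hx => ((hs x).mp hx).1)
      (fun s hsg hs0 => (hs s).mpr ⟨hsg, hs0⟩)
      (fun x hx => ⟨x, ((hs x).mp hx).1, ((hs x).mp hx).2, Relation.ReflTransGen.refl⟩)
      (fun x hx hxn => absurd hx hxn)
      (by have := mNew_le g ((PySem.Set.ofList g).filter (fun u => pyCoord u player_id == 0)); omega)
  simp only [dfs_alt]
  unfold GProp
  constructor
  · intro h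
    obtain ⟨x, hx, hf⟩ := List.any_eq_true.mp h
    refine ⟨x, (hchar x).mp hx, ?_⟩
    obtain ⟨d, hd, hdd⟩ := List.any_eq_true.mp hf
    rw [Bool.and_eq_true] at hdd
    apply List.any_eq_true.mpr
    refine ⟨d, hd, ?_⟩
    rw [Bool.and_eq_true, decide_eq_true_eq, decide_eq_true_eq]
    refine ⟨(PySem.Set.mem_ofList _ _).mp ((PySem.Set.contains_iff _ _).mp hdd.1), ?_⟩
    have := hdd.2
    rw [beq_iff_eq] at this
    exact this
  · rintro ⟨x, hxr, hgoal⟩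
    apply List.any_eq_true.mpr
    refine ⟨x, (hchar x).mpr hxr, ?_⟩
    obtain ⟨d, hd, hdd⟩ := List.any_eq_true.mp hgoal
    rw [Bool.and_eq_true, decide_eq_true_eq, decide_eq_true_eq] at hdd
    apply List.any_eq_true.mpr
    refine ⟨d, hd, ?_⟩
    rw [Bool.and_eq_true]
    exact ⟨(PySem.Set.contains_iff _ _).mpr ((PySem.Set.mem_ofList _ _).mpr hdd.1),
      beq_iff_eq.mpr hdd.2⟩

-- ===== VERDICT (by name: the statement is the Claim_ definition above) =====
theorem dfs_spec : Claim_equal_dfs := by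
  intro g player_id size _hdom _hpre
  unfold Spec_dfs
  have h1 := dfs_eq_true_iff g player_id size
  have h2 := dfs_alt_eq_true_iff g player_id size
  cases hA : dfs g player_id size <;> cases hB : dfs_alt g player_id size <;> simp_all
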